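-- pv_equiv track=rewrite | github.com/seebass/shinefour-advent-of-code | day-12/daniel/solution.py | count_horizontal_sides
-- ===== SOURCE A (Python) =====
-- from itertools import groupby, product
-- from operator import itemgetter
--
-- Location = tuple[int, int]
--
-- def count_horizontal_sides(region: set[Location]):
--     side_count = 0
--
--     sorted_by_row = sorted(region, key=itemgetter(0, 1))
--     grouped = [list(g) for _, g in groupby(sorted_by_row, key=itemgetter(0))]
--
--     for group, direction in product(grouped, (-1, 1)):
--         continues = False
--         for row, col in group:
--             has_neighbor_in_direction = (row + direction, col) in region
--             if not continues and not has_neighbor_in_direction: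
--                 side_count += 1
--                 # catches gaps, where sides bow inwards
--                 continues = (row, col + 1) in region
--             elif not has_neighbor_in_direction:
--                 # catches gaps, where sides bow inwards
--                 continues = (row, col + 1) in region
--             elif has_neighbor_in_direction:
--                 continues = False
--
--     return side_count
-- ===== SOURCE B (Python) =====
-- def count_horizontal_sides(region):
--     total = 0
--     for row, col in region:
--         for d in (-1, 1):
--             if (row + d, col) not in region and not (
--                 (row, col - 1) in region and (row + d, col - 1) not in region
--             ):
--                 total += 1
--     return total
-- ===== Notes on version B (the rewrite author's own statement) =====
-- stated objective: simpler
-- what changed: Replaces the sort/groupby/product machinery and the stateful 'continues' flag with a stateless per-cell test: an edge above/below (r,c) starts a new side iff the cell to its left is absent or has no such edge.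
import Mathlib
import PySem

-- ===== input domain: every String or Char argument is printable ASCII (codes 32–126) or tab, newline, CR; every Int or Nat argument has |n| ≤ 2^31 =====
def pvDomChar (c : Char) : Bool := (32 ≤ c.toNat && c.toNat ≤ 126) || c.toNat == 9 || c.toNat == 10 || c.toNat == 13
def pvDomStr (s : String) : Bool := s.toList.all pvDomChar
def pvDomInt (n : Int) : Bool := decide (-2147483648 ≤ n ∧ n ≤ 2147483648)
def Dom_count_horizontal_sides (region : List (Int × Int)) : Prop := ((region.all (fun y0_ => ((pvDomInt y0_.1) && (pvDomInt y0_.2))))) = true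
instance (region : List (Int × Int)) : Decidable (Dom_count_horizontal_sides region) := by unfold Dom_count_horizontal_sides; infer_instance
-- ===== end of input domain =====

-- B replaces A's sort/groupby/product machinery and stateful 'continues' flag with a stateless
-- per-cell test (objective: simpler). Equivalence is about the return value; neither mutates its argument.

-- ===== PORT A =====
-- groupby(sorted_by_row, key=itemgetter(0)) : contiguous runs of equal first component
def pvGroupRuns : List (Int × Int) → List (List (Int × Int))
  | [] => []
  | x :: xs =>
    match pvGroupRuns xs with
    | [] => [[x]]
    | [] :: gs => [x] :: gs
    | (y :: g) :: gs => if x.1 = y.1 then (x :: y :: g) :: gs else [x] :: (y :: g) :: gs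

-- one iteration of A's inner loop body, state = (side_count, continues)
def pvStep (region : List (Int × Int)) (d : Int) (st : Int × Bool) (rc : Int × Int) : Int × Bool :=
  let has := decide ((rc.1 + d, rc.2) ∈ region)
  if !st.2 && !has then (st.1 + 1, decide ((rc.1, rc.2 + 1) ∈ region))
  else if !has then (st.1, decide ((rc.1, rc.2 + 1) ∈ region))
  else (st.1, false)

def count_horizontal_sides (region : List (Int × Int)) : Int :=
  let sorted_by_row := PySem.List.sorted2 region Prod.fst Prod.snd
  let grouped := pvGroupRuns sorted_by_row
  (grouped.flatMap fun g => [(g, (-1 : Int)), (g, (1 : Int))]).foldl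
    (fun side_count gd => (gd.1.foldl (pvStep region gd.2) (side_count, false)).1) 0

-- ===== PORT B =====
def pvNewSide (region : List (Int × Int)) (d : Int) (rc : Int × Int) : Bool :=
  !decide ((rc.1 + d, rc.2) ∈ region) &&
    !(decide ((rc.1, rc.2 - 1) ∈ region) && !decide ((rc.1 + d, rc.2 - 1) ∈ region))

def count_horizontal_sides_alt (region : List (Int × Int)) : Int :=
  region.foldl (fun total rc =>
    [(-1 : Int), 1].foldl (fun t d => if pvNewSide region d rc then t + 1 else t) total) 0

-- ===== PRECONDITION & SPEC =====
-- Python A's argument is a set, so its List representation holds distinct elements;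
-- Pre_ states exactly that representation invariant and excludes no Python input.
def Pre_count_horizontal_sides (region : List (Int × Int)) : Prop := region.Nodup
instance (region : List (Int × Int)) : Decidable (Pre_count_horizontal_sides region) := by
  unfold Pre_count_horizontal_sides; infer_instance

def pvWitness_count_horizontal_sides : (List (Int × Int)) := [(0, 0), (0, 1), (1, 0)]

def Spec_count_horizontal_sides (region : List (Int × Int)) (out : Int) : Prop := out = count_horizontal_sides_alt region
instance (region : List (Int × Int)) (out : Int) : Decidable (Spec_count_horizontal_sides region out) := by unfold Spec_count_horizontal_sides; infer_instance

-- ===== CLAIM (what is proved, stated in full; the proofs are below) =====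
def Claim_equal_count_horizontal_sides : Prop := ∀ (region : List (Int × Int)), Dom_count_horizontal_sides region → Pre_count_horizontal_sides region → Spec_count_horizontal_sides region (count_horizontal_sides region)

-- ===== LEMMAS AND PROOFS =====

-- the comparison sorted2 region Prod.fst Prod.snd uses: strict lexicographic order on pairs
def pvLtLex (a b : Int × Int) : Bool :=
  decide (a.1 < b.1) || (!decide (b.1 < a.1) && decide (a.2 < b.2))

def pvLex (a b : Int × Int) : Prop := a.1 < b.1 ∨ (a.1 = b.1 ∧ a.2 < b.2)

lemma pvSorted2_eq (region : List (Int × Int)) :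
    PySem.List.sorted2 region Prod.fst Prod.snd =
      region.foldl (fun acc x => PySem.List.insertBy pvLtLex x acc) [] := by
  rfl

lemma pvLtLex_asymm (x y : Int × Int) (h : pvLtLex x y = true) : pvLtLex y x = false := by
  simp only [pvLtLex, Bool.or_eq_true, Bool.and_eq_true, Bool.not_eq_true', decide_eq_true_eq,
    Bool.or_eq_false_iff, Bool.and_eq_false_iff, Bool.not_eq_false', decide_eq_false_iff_not,
    not_lt] at *
  omega

lemma pvLtLex_trans_neg (x y z : Int × Int) (h1 : pvLtLex x y = true)
    (h2 : pvLtLex z y = false) : pvLtLex z x = false := by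
  simp only [pvLtLex, Bool.or_eq_true, Bool.and_eq_true, Bool.not_eq_true', decide_eq_true_eq,
    Bool.or_eq_false_iff, Bool.and_eq_false_iff, Bool.not_eq_false', decide_eq_false_iff_not,
    not_lt] at *
  omega

lemma pairwise_insertBy (x : Int × Int) (l : List (Int × Int))
    (h : l.Pairwise (fun a b => pvLtLex b a = false)) :
    (PySem.List.insertBy pvLtLex x l).Pairwise (fun a b => pvLtLex b a = false) := by
  induction l with
  | nil => simp [PySem.List.insertBy]
  | cons y ys ih =>
    rw [List.pairwise_cons] at h
    obtain ⟨hy, hys⟩ := h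
    by_cases hxy : pvLtLex x y = true
    · rw [show PySem.List.insertBy pvLtLex x (y :: ys) = x :: y :: ys by
        simp [PySem.List.insertBy, hxy]]
      refine List.Pairwise.cons ?_ (List.Pairwise.cons hy hys)
      intro z hz
      rw [List.mem_cons] at hz
      rcases hz with rfl | hz
      · exact pvLtLex_asymm x z hxy
      · exact pvLtLex_trans_neg x y z hxy (hy z hz)
    · rw [show PySem.List.insertBy pvLtLex x (y :: ys) = y :: PySem.List.insertBy pvLtLex x ys by
        simp [PySem.List.insertBy, hxy]]
      refine List.Pairwise.cons ?_ (ih hys)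
      intro z hz
      rw [PySem.List.mem_insertBy] at hz
      rcases hz with rfl | hz
      · simpa using hxy
      · exact hy z hz

lemma pairwise_foldl_insertBy (l : List (Int × Int)) :
    ∀ acc : List (Int × Int), acc.Pairwise (fun a b => pvLtLex b a = false) →
      (l.foldl (fun acc x => PySem.List.insertBy pvLtLex x acc) acc).Pairwise
        (fun a b => pvLtLex b a = false) := by
  induction l with
  | nil => intro acc h; simpa using h
  | cons x xs ih =>
    intro acc h
    exact ih _ (pairwise_insertBy x acc h)

lemma pvSorted_pairwise_lex (region : List (Int × Int)) (hnd : region.Nodup) :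
    (PySem.List.sorted2 region Prod.fst Prod.snd).Pairwise pvLex := by
  have hle : (PySem.List.sorted2 region Prod.fst Prod.snd).Pairwise
      (fun a b => pvLtLex b a = false) := by
    rw [pvSorted2_eq]
    exact pairwise_foldl_insertBy region [] (by simp)
  have hnds : (PySem.List.sorted2 region Prod.fst Prod.snd).Nodup :=
    (PySem.List.sorted2_perm region Prod.fst Prod.snd false).nodup_iff.mpr hnd
  have := List.Pairwise.and hnds hle
  refine this.imp ?_
  rintro a b ⟨hne, hba⟩
  have hab : a.1 ≠ b.1 ∨ a.2 ≠ b.2 := by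
    by_contra hc
    push Not at hc
    exact hne (Prod.ext hc.1 hc.2)
  simp only [pvLtLex, Bool.or_eq_false_iff, Bool.and_eq_false_iff, Bool.not_eq_false',
    decide_eq_false_iff_not, decide_eq_true_iff, not_lt] at hba
  unfold pvLex
  omega

lemma groupRuns_flatten : ∀ s : List (Int × Int), (pvGroupRuns s).flatten = s := by
  intro s
  induction s with
  | nil => rfl
  | cons x xs ih =>
    cases h : pvGroupRuns xs with
    | nil =>
      rw [h] at ih
      simp only [pvGroupRuns, h, List.flatten]
      simp at ih
      simp [ih]
    | cons g gs =>
      cases g with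
      | nil =>
        rw [h] at ih
        simp only [pvGroupRuns, h]
        simp only [List.flatten] at ih ⊢
        simp at ih
        simp [ih]
      | cons y g' =>
        rw [h] at ih
        simp only [pvGroupRuns, h]
        split <;> simp_all

lemma pvLex_ne {a b : Int × Int} (h : pvLex a b) : a ≠ b := by
  intro he
  subst he
  unfold pvLex at h
  omega

lemma groupRuns_ne_nil : ∀ s : List (Int × Int), ∀ g ∈ pvGroupRuns s, g ≠ [] := by
  intro s
  induction s with
  | nil => intro g hg; simp [pvGroupRuns] at hg
  | cons x xs ih =>
    intro g hg
    cases hr : pvGroupRuns xs with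
    | nil => rw [pvGroupRuns, hr] at hg; simp at hg; simp [hg]
    | cons g0 gs =>
      cases g0 with
      | nil => exact absurd rfl (ih [] (hr ▸ List.mem_cons_self))
      | cons y g0' =>
        have hred : pvGroupRuns (x :: xs) =
            if x.1 = y.1 then (x :: y :: g0') :: gs else [x] :: (y :: g0') :: gs := by
          rw [pvGroupRuns, hr]
        rw [hred] at hg
        split at hg <;> rw [List.mem_cons] at hg <;> rcases hg with rfl | hg
        · simp
        · exact ih g (hr ▸ List.mem_cons_of_mem _ hg)
        · simp
        · exact ih g (hr ▸ hg)

lemma groupGood : ∀ s : List (Int × Int), s.Pairwise pvLex →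
    ∀ g ∈ pvGroupRuns s,
      (∀ p ∈ g, p ∈ s) ∧ (∀ p ∈ g, ∀ q ∈ g, p.1 = q.1) ∧
        g.Pairwise (fun p q => p.2 < q.2) ∧ (∀ x ∈ s, ∀ p ∈ g, x.1 = p.1 → x ∈ g) := by
  intro s
  induction s with
  | nil => intro _ g hg; simp [pvGroupRuns] at hg
  | cons x xs ih =>
    intro hs g hg
    rw [List.pairwise_cons] at hs
    obtain ⟨hx, hxs⟩ := hs
    have IH := ih hxs
    have hnd_xs : xs.Nodup := hxs.imp (fun h => pvLex_ne h)
    cases hr : pvGroupRuns xs with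
    | nil =>
      have hxs0 : xs = [] := by
        have hf := groupRuns_flatten xs
        rw [hr] at hf
        simpa using hf.symm
      subst hxs0
      rw [pvGroupRuns, hr] at hg
      simp at hg
      subst hg
      refine ⟨by simp, by simp, by simp, ?_⟩
      intro x' hx' p hp hrow
      simp at hx' hp ⊢
      exact hx'
    | cons g0 gs =>
      cases g0 with
      | nil => exact absurd rfl (groupRuns_ne_nil xs [] (hr ▸ List.mem_cons_self))
      | cons y g0' =>
        have hflat : (y :: g0') ++ gs.flatten = xs := by
          have hf := groupRuns_flatten xs
          rw [hr] at hf
          simpa using hf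
        have IHold := IH (y :: g0') (hr ▸ List.mem_cons_self)
        have hy_xs : y ∈ xs := by rw [← hflat]; simp
        have hsplit := List.pairwise_append.mp (hflat ▸ hxs)
        have hdisj : ∀ a : Int × Int, a ∈ y :: g0' → a ∈ gs.flatten → False := by
          intro a h1 h2
          exact (List.nodup_append.mp (hflat ▸ hnd_xs)).2.2 a h1 a h2 rfl
        have hred : pvGroupRuns (x :: xs) =
            if x.1 = y.1 then (x :: y :: g0') :: gs else [x] :: (y :: g0') :: gs := by
          rw [pvGroupRuns, hr]
        rw [hred] at hg
        by_cases hxy : x.1 = y.1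
        · rw [if_pos hxy] at hg
          rw [List.mem_cons] at hg
          rcases hg with rfl | hg
          · -- g = x :: y :: g0'
            have hrow : ∀ p ∈ (x :: y :: g0' : List (Int × Int)), p.1 = y.1 := by
              intro p hp
              rw [List.mem_cons] at hp
              rcases hp with rfl | hp
              · exact hxy
              · exact IHold.2.1 p hp y List.mem_cons_self
            refine ⟨?_, ?_, ?_, ?_⟩
            · intro p hp
              rw [List.mem_cons] at hp
              rcases hp with rfl | hp
              · exact List.mem_cons_self
              · exact List.mem_cons_of_mem _ (IHold.1 p hp)
            · intro p hp q hq
              rw [hrow p hp, hrow q hq]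
            · refine List.Pairwise.cons ?_ IHold.2.2.1
              intro p hp
              have hpx : p ∈ xs := IHold.1 p hp
              have hlex := hx p hpx
              have hpr : p.1 = y.1 := IHold.2.1 p hp y List.mem_cons_self
              unfold pvLex at hlex
              omega
            · intro x' hx' p hp hrowp
              have hx'y : x'.1 = y.1 := by rw [hrowp, hrow p hp]
              rw [List.mem_cons] at hx'
              rcases hx' with rfl | hx'
              · exact List.mem_cons_self
              · exact List.mem_cons_of_mem _
                  (IHold.2.2.2 x' hx' y List.mem_cons_self hx'y)
          · -- g ∈ gs, rows there differ from x.1 = y.1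
            have IHg := IH g (hr ▸ List.mem_cons_of_mem _ hg)
            refine ⟨fun p hp => List.mem_cons_of_mem _ (IHg.1 p hp), IHg.2.1, IHg.2.2.1, ?_⟩
            intro x' hx' p hp hrowp
            rw [List.mem_cons] at hx'
            rcases hx' with rfl | hx'
            · exfalso
              have hpxs : p ∈ xs := IHg.1 p hp
              have hpold : p ∈ y :: g0' :=
                IHold.2.2.2 p hpxs y List.mem_cons_self (by rw [← hrowp, hxy])
              have hpfl : p ∈ gs.flatten := List.mem_flatten.mpr ⟨g, hg, hp⟩
              exact hdisj p hpold hpfl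
            · exact IHg.2.2.2 x' hx' p hp hrowp
        · rw [if_neg hxy] at hg
          have hxlty : x.1 < y.1 := by
            have hlex := hx y hy_xs
            unfold pvLex at hlex
            omega
          have hNoRowX : ∀ x' ∈ xs, x'.1 ≠ x.1 := by
            intro x' hx' hre
            rw [← hflat] at hx'
            rw [List.mem_append] at hx'
            rcases hx' with hx' | hx'
            · have : x'.1 = y.1 := IHold.2.1 x' hx' y List.mem_cons_self
              omega
            · have hlex := hsplit.2.2 y List.mem_cons_self x' hx'
              unfold pvLex at hlex
              omega
          rw [List.mem_cons] at hg
          rcases hg with rfl | hg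
          · -- g = [x]
            refine ⟨by simp, by simp, by simp, ?_⟩
            intro x' hx' p hp hrowp
            simp at hp
            subst hp
            rw [List.mem_cons] at hx'
            rcases hx' with rfl | hx'
            · simp
            · exact absurd hrowp (hNoRowX x' hx')
          · -- g = y :: g0' or g ∈ gs
            have hgmem : g ∈ pvGroupRuns xs := hr ▸ hg
            have IHg := IH g hgmem
            refine ⟨fun p hp => List.mem_cons_of_mem _ (IHg.1 p hp), IHg.2.1, IHg.2.2.1, ?_⟩
            intro x' hx' p hp hrowp
            rw [List.mem_cons] at hx'
            rcases hx' with rfl | hx'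
            · exact absurd hrowp.symm (hNoRowX p (IHg.1 p hp))
            · exact IHg.2.2.2 x' hx' p hp hrowp

lemma scan_eq (region : List (Int × Int)) (d r : Int) :
    ∀ (g : List (Int × Int)) (b : Bool) (acc lo : Int),
      (∀ p ∈ g, p.1 = r) →
      (∀ p ∈ g, p ∈ region) →
      g.Pairwise (fun p q => p.2 < q.2) →
      (∀ c : Int, lo < c → (r, c) ∈ region → (r, c) ∈ g) →
      (∀ p ∈ g, lo < p.2) →
      (∀ h t, g = h :: t → b = (decide ((r, h.2 - 1) ∈ region) && !decide ((r + d, h.2 - 1) ∈ region))) →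
      (g.foldl (pvStep region d) (acc, b)).1 =
        acc + (g.map (fun rc => if pvNewSide region d rc then (1 : Int) else 0)).sum := by
  intro g
  induction g with
  | nil => intro b acc lo _ _ _ _ _ _; simp
  | cons h0 t ih =>
    intro b acc lo Hr Hmem Hsort Hcomp Hlo Hflag
    have hb := Hflag h0 t rfl
    have hr0 : h0.1 = r := Hr h0 List.mem_cons_self
    have hmem0 : h0 ∈ region := Hmem h0 List.mem_cons_self
    have h0eq : h0 = (r, h0.2) := Prod.ext hr0 rfl
    have hlo0 : lo < h0.2 := Hlo h0 List.mem_cons_self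
    rw [List.pairwise_cons] at Hsort
    obtain ⟨hcols, Hsort'⟩ := Hsort
    have hstep : pvStep region d (acc, b) h0 =
        (acc + (if pvNewSide region d h0 then (1 : Int) else 0),
         if decide ((r + d, h0.2) ∈ region) then false
         else decide ((r, h0.2 + 1) ∈ region)) := by
      simp only [pvStep, pvNewSide, hb, hr0]
      by_cases h1 : (r + d, h0.2) ∈ region <;>
        by_cases h2 : (r, h0.2 - 1) ∈ region <;>
        by_cases h3 : (r + d, h0.2 - 1) ∈ region <;>
        simp [h1, h2, h3]
    rw [List.foldl_cons, hstep]
    rw [ih (if decide ((r + d, h0.2) ∈ region) then false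
            else decide ((r, h0.2 + 1) ∈ region))
          (acc + (if pvNewSide region d h0 then (1 : Int) else 0)) h0.2
          (fun p hp => Hr p (List.mem_cons_of_mem _ hp))
          (fun p hp => Hmem p (List.mem_cons_of_mem _ hp))
          Hsort' ?_ hcols ?_]
    · simp only [List.map_cons, List.sum_cons]
      ring
    · -- completeness for the tail
      intro c hc hcm
      have hin := Hcomp c (by omega) hcm
      rw [List.mem_cons] at hin
      rcases hin with he | hin
      · exfalso
        have : c = h0.2 := congrArg Prod.snd he
        omega
      · exact hin
    · -- flag invariant for the tail
      intro h2 t2 ht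
      subst ht
      have hr2 : h2.1 = r := Hr h2 (List.mem_cons_of_mem _ List.mem_cons_self)
      have hmem2 : h2 ∈ region := Hmem h2 (List.mem_cons_of_mem _ List.mem_cons_self)
      have h2eq : h2 = (r, h2.2) := Prod.ext hr2 rfl
      have hlt02 : h0.2 < h2.2 := hcols h2 List.mem_cons_self
      rw [List.pairwise_cons] at Hsort'
      obtain ⟨hlt2, _⟩ := Hsort'
      by_cases hadj : h2.2 = h0.2 + 1
      · have e1 : ((r, h2.2 - 1) : Int × Int) = h0 := by
          rw [h0eq]; simp [hadj]
        have e2 : ((r, h0.2 + 1) : Int × Int) = h2 := by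
          rw [h2eq]; simp [hadj]
        rw [e1]
        rw [show ((r + d, h2.2 - 1) : Int × Int) = (r + d, h0.2) by simp [hadj]]
        rw [e2]
        by_cases h1 : (r + d, h0.2) ∈ region <;>
          simp [h1, hmem0, hmem2]
      · have hgap : h0.2 + 1 < h2.2 := by omega
        have hn1 : ((r, h2.2 - 1) : Int × Int) ∉ region := by
          intro hmemc
          have hin := Hcomp (h2.2 - 1) (by omega) hmemc
          rw [List.mem_cons] at hin
          rcases hin with he | hin
          · have : h2.2 - 1 = h0.2 := congrArg Prod.snd he
            omega
          · rw [List.mem_cons] at hin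
            rcases hin with he | hin
            · have : h2.2 - 1 = h2.2 := congrArg Prod.snd he
              omega
            · have := hlt2 _ hin
              simp at this
              omega
        have hn2 : ((r, h0.2 + 1) : Int × Int) ∉ region := by
          intro hmemc
          have hin := Hcomp (h0.2 + 1) (by omega) hmemc
          rw [List.mem_cons] at hin
          rcases hin with he | hin
          · have : h0.2 + 1 = h0.2 := congrArg Prod.snd he
            omega
          · rw [List.mem_cons] at hin
            rcases hin with he | hin
            · have : h0.2 + 1 = h2.2 := congrArg Prod.snd he
              omega
            · have := hlt2 _ hin
              simp at this
              omega
        by_cases h1 : (r + d, h0.2) ∈ region <;> simp [h1, hn1, hn2]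

lemma group_count (region s g : List (Int × Int))
    (hmem : ∀ x : Int × Int, x ∈ s ↔ x ∈ region)
    (h1 : ∀ p ∈ g, p ∈ s) (h2 : ∀ p ∈ g, ∀ q ∈ g, p.1 = q.1)
    (h3 : g.Pairwise (fun p q => p.2 < q.2))
    (h4 : ∀ x ∈ s, ∀ p ∈ g, x.1 = p.1 → x ∈ g)
    (d acc : Int) :
    (g.foldl (pvStep region d) (acc, false)).1 =
      acc + (g.map (fun rc => if pvNewSide region d rc then (1 : Int) else 0)).sum := by
  cases g with
  | nil => simp
  | cons h0 t =>
    have hpc := List.pairwise_cons.mp h3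
    have hnotm : ((h0.1, h0.2 - 1) : Int × Int) ∉ region := by
      intro hm
      have hin := h4 _ ((hmem _).mpr hm) h0 List.mem_cons_self rfl
      rw [List.mem_cons] at hin
      rcases hin with he | hin
      · have : h0.2 - 1 = h0.2 := congrArg Prod.snd he
        omega
      · have := hpc.1 _ hin
        simp at this
        omega
    refine scan_eq region d h0.1 (h0 :: t) false acc (h0.2 - 1)
      (fun p hp => h2 p hp h0 List.mem_cons_self)
      (fun p hp => (hmem p).mp (h1 p hp))
      h3 ?_ ?_ ?_
    · intro c _ hcm
      exact h4 _ ((hmem _).mpr hcm) h0 List.mem_cons_self rfl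
    · intro p hp
      rw [List.mem_cons] at hp
      rcases hp with rfl | hp
      · omega
      · have := hpc.1 p hp
        omega
    · intro h t' ht
      injection ht with e1 _
      subst e1
      simp [hnotm]

lemma sum_map_add (l : List (Int × Int)) (f g : Int × Int → Int) :
    (l.map fun x => f x + g x).sum = (l.map f).sum + (l.map g).sum := by
  induction l with
  | nil => simp
  | cons x xs ih => simp [ih]; ring

-- ===== VERDICT (by name: the statement is the Claim_ definition above) =====
theorem count_horizontal_sides_spec : Claim_equal_count_horizontal_sides := by
  intro region _ hpre
  unfold Spec_count_horizontal_sides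
  have hperm : (PySem.List.sorted2 region Prod.fst Prod.snd).Perm region :=
    PySem.List.sorted2_perm region Prod.fst Prod.snd false
  have hmem : ∀ x : Int × Int,
      x ∈ PySem.List.sorted2 region Prod.fst Prod.snd ↔ x ∈ region :=
    fun x => hperm.mem_iff
  have hsp : (PySem.List.sorted2 region Prod.fst Prod.snd).Pairwise pvLex :=
    pvSorted_pairwise_lex region hpre
  set s := PySem.List.sorted2 region Prod.fst Prod.snd with hsdef
  set F : Int × Int → Int := fun rc =>
    (if pvNewSide region (-1) rc then (1 : Int) else 0) +
      (if pvNewSide region 1 rc then (1 : Int) else 0) with hF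
  have hA : count_horizontal_sides region = (s.map F).sum := by
    show ((pvGroupRuns s).flatMap fun g => [(g, (-1 : Int)), (g, (1 : Int))]).foldl
        (fun side_count gd => (gd.1.foldl (pvStep region gd.2) (side_count, false)).1) 0 =
      (s.map F).sum
    rw [PySem.List.foldl_congr_mem _ _
      (fun (acc : Int) (gd : List (Int × Int) × Int) =>
        acc + (gd.1.map (fun rc => if pvNewSide region gd.2 rc then (1 : Int) else 0)).sum)
      _
      (by
        intro acc gd hgd
        rw [List.mem_flatMap] at hgd
        obtain ⟨g, hg, hgd⟩ := hgd
        have hgood := groupGood s hsp g hg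
        have hcnt := group_count region s g hmem hgood.1 hgood.2.1 hgood.2.2.1 hgood.2.2.2
        rw [List.mem_cons, List.mem_cons] at hgd
        rcases hgd with rfl | hgd
        · exact hcnt (-1) acc
        · rcases hgd with rfl | hgd
          · exact hcnt 1 acc
          · simp at hgd)]
    rw [PySem.List.foldl_add _
      (fun gd : List (Int × Int) × Int =>
        (gd.1.map (fun rc => if pvNewSide region gd.2 rc then (1 : Int) else 0)).sum)]
    rw [List.map_flatMap]
    rw [List.flatMap_def, List.sum_flatten, List.map_map]
    rw [List.map_congr_left (f := List.sum ∘ fun g : List (Int × Int) =>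
          List.map (fun gd : List (Int × Int) × Int =>
              (gd.1.map (fun rc => if pvNewSide region gd.2 rc then (1 : Int) else 0)).sum)
            [(g, (-1 : Int)), (g, (1 : Int))])
        (g := fun g : List (Int × Int) => (g.map F).sum)
      (by
        intro g _
        simp only [Function.comp, List.map_cons, List.map_nil, List.sum_cons,
          List.sum_nil, hF]
        rw [sum_map_add g]
        ring)]
    have hflat2 : ((pvGroupRuns s).map fun g : List (Int × Int) => (g.map F).sum).sum =
        (((pvGroupRuns s).map (List.map F)).map List.sum).sum := by
      rw [List.map_map]
      rfl
    rw [zero_add, hflat2, ← List.sum_flatten, ← List.map_flatten, groupRuns_flatten]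
  have hB : count_horizontal_sides_alt region = (region.map F).sum := by
    show region.foldl (fun total rc =>
        [(-1 : Int), 1].foldl (fun t d => if pvNewSide region d rc then t + 1 else t) total) 0 =
      (region.map F).sum
    rw [PySem.List.foldl_congr_mem _ _
      (fun (total : Int) (rc : Int × Int) => total + F rc) _
      (by
        intro total rc _
        simp only [List.foldl_cons, List.foldl_nil, hF]
        by_cases p1 : pvNewSide region (-1) rc <;>
          by_cases p2 : pvNewSide region 1 rc <;>
          simp [p1, p2]
        ring)]
    rw [PySem.List.foldl_add _ F]
    simp
  rw [hA, hB]
  exact ((hperm.map F).sum_eq)
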